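-- pv_equiv track=rewrite | github.com/Mondego/VeriAct | baselines/utils/models.py | _resolve_provider
-- ===== SOURCE A (Python) =====
-- _PROVIDERS: dict[str, dict] = {
--     "gpt": {
--         "base_url": None,
--         "api_key_env": "OPENAI_API_KEY",
--     },
--     "o1": {
--         "base_url": None,
--         "api_key_env": "OPENAI_API_KEY",
--     },
--     "o3": {
--         "base_url": None,
--         "api_key_env": "OPENAI_API_KEY",
--     },
--     "gemini": {
--         "base_url": "https://generativelanguage.googleapis.com/v1beta/openai/",
--         "api_key_env": "GOOGLE_API_KEY",
--     },
--     "claude": {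
--         "base_url": "https://api.anthropic.com/v1/",
--         "api_key_env": "ANTHROPIC_API_KEY",
--     },
--     "qwen": {
--         "base_url": "http://localhost:8000/v1",
--         "api_key_env": "VLLM_API_KEY",
--     },
--     "codellama": {
--         "base_url": "http://localhost:8000/v1",
--         "api_key_env": "VLLM_API_KEY",
--     },
--     "deepseek-ai": {
--         "base_url": "http://localhost:8000/v1",
--         "api_key_env": "VLLM_API_KEY",
--     },
--     "deepseek": {
--         "base_url": "https://api.deepseek.com",
--         "api_key_env": "DEEPSEEK_API_KEY",
--     },
--     "mistral": {
--         "base_url": "https://api.mistral.ai/v1",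
--         "api_key_env": "MISTRAL_API_KEY",
--     },
-- }
--
-- def _resolve_provider(model: str) -> dict:
--     """Return the provider config for *model*, or raise ValueError."""
--     for prefix in sorted(_PROVIDERS, key=len, reverse=True):
--         if model.lower().startswith(prefix):
--             return _PROVIDERS[prefix]
--     raise ValueError(
--         f"Unsupported model: {model!r}. "
--         f"Supported prefixes: {list(_PROVIDERS.keys())}"
--     )
-- ===== SOURCE B (Python) =====
-- # Dispatch on the first character of the lowercased model: each bucket lists its
-- # (prefix, base_url, api_key_env) triples longest-prefix-first, so the first match
-- # in the (at most two-element) bucket is the longest matching prefix overall.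
-- _INDEX: dict[str, list[tuple]] = {
--     "g": [
--         ("gemini", "https://generativelanguage.googleapis.com/v1beta/openai/", "GOOGLE_API_KEY"),
--         ("gpt", None, "OPENAI_API_KEY"),
--     ],
--     "o": [
--         ("o1", None, "OPENAI_API_KEY"),
--         ("o3", None, "OPENAI_API_KEY"),
--     ],
--     "c": [
--         ("codellama", "http://localhost:8000/v1", "VLLM_API_KEY"),
--         ("claude", "https://api.anthropic.com/v1/", "ANTHROPIC_API_KEY"),
--     ],
--     "q": [
--         ("qwen", "http://localhost:8000/v1", "VLLM_API_KEY"),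
--     ],
--     "d": [
--         ("deepseek-ai", "http://localhost:8000/v1", "VLLM_API_KEY"),
--         ("deepseek", "https://api.deepseek.com", "DEEPSEEK_API_KEY"),
--     ],
--     "m": [
--         ("mistral", "https://api.mistral.ai/v1", "MISTRAL_API_KEY"),
--     ],
-- }
--
--
-- def _resolve_provider(model: str) -> dict:
--     """Return the provider config for *model*, or raise ValueError."""
--     m = model.lower()
--     for prefix, base_url, api_key_env in _INDEX.get(m[:1], ()):
--         if m.startswith(prefix):
--             return {"base_url": base_url, "api_key_env": api_key_env}
--     raise ValueError(
--         f"Unsupported model: {model!r}. "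
--         f"Supported prefixes: {['gpt', 'o1', 'o3', 'gemini', 'claude', 'qwen', 'codellama', 'deepseek-ai', 'deepseek', 'mistral']}"
--     )
-- ===== Notes on version B (the rewrite author's own statement) =====
-- stated objective: alternative
-- what changed: B replaces A's sort-all-prefixes-by-length-then-linear-scan with a precomputed first-character dispatch table: only the (at most two-element) bucket keyed by model.lower()[:1] is scanned, buckets hold (prefix, base_url, api_key_env) triples longest-first and the returned dict is constructed from the matching triple.
import Mathlib
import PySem

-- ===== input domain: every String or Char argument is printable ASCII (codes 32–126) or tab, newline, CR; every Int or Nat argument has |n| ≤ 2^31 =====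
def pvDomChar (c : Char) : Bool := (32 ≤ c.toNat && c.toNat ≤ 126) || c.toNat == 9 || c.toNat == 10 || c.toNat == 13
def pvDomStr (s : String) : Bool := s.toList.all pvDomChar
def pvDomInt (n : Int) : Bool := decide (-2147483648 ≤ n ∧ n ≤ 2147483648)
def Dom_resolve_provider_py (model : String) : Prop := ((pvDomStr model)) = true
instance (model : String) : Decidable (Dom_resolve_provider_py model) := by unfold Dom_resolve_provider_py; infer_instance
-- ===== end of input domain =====

-- B replaces A's sort-all-prefixes-then-scan by a first-character dispatch table: buckets of
-- (prefix, base_url, api_key_env) triples keyed by the prefix's first character, longest-first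
-- inside each bucket, so only the (≤ 2-element) bucket of model.lower()[:1] is scanned; objective: simpler.
-- On models matching no prefix A raises ValueError; those inputs are outside Pre_.

-- ===== PORT A =====
-- the module-level _PROVIDERS dict
def pvProviders : PySem.Dict String (List (String × Option String)) :=
  PySem.Dict.ofList [
    ("gpt", [("base_url", none), ("api_key_env", some "OPENAI_API_KEY")]),
    ("o1", [("base_url", none), ("api_key_env", some "OPENAI_API_KEY")]),
    ("o3", [("base_url", none), ("api_key_env", some "OPENAI_API_KEY")]),
    ("gemini", [("base_url", some "https://generativelanguage.googleapis.com/v1beta/openai/"), ("api_key_env", some "GOOGLE_API_KEY")]),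
    ("claude", [("base_url", some "https://api.anthropic.com/v1/"), ("api_key_env", some "ANTHROPIC_API_KEY")]),
    ("qwen", [("base_url", some "http://localhost:8000/v1"), ("api_key_env", some "VLLM_API_KEY")]),
    ("codellama", [("base_url", some "http://localhost:8000/v1"), ("api_key_env", some "VLLM_API_KEY")]),
    ("deepseek-ai", [("base_url", some "http://localhost:8000/v1"), ("api_key_env", some "VLLM_API_KEY")]),
    ("deepseek", [("base_url", some "https://api.deepseek.com"), ("api_key_env", some "DEEPSEEK_API_KEY")]),
    ("mistral", [("base_url", some "https://api.mistral.ai/v1"), ("api_key_env", some "MISTRAL_API_KEY")])]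

-- A's 'for prefix in sorted(...): if ...: return ...'; the [] in the nil case is the ValueError branch, excluded by Pre_
def pvLoopA (model : String) : List String → List (String × Option String)
  | [] => []
  | p :: rest =>
    if PySem.Str.startswith (PySem.Str.lower model) p then PySem.Dict.getD pvProviders p []
    else pvLoopA model rest

def resolve_provider_py (model : String) : List (String × Option String) :=
  pvLoopA model (PySem.List.sorted (PySem.Dict.keys pvProviders) (fun p => PySem.Str.len p) true)

-- ===== PORT B =====
-- Source B's module-level _INDEX: first-character dispatch table of (prefix, base_url, api_key_env) triples
def pvIndex : PySem.Dict String (List (String × Option String × String)) :=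
  PySem.Dict.ofList [
    ⟨"g", [⟨"gemini", some "https://generativelanguage.googleapis.com/v1beta/openai/", "GOOGLE_API_KEY"⟩,
           ⟨"gpt", none, "OPENAI_API_KEY"⟩]⟩,
    ⟨"o", [⟨"o1", none, "OPENAI_API_KEY"⟩,
           ⟨"o3", none, "OPENAI_API_KEY"⟩]⟩,
    ⟨"c", [⟨"codellama", some "http://localhost:8000/v1", "VLLM_API_KEY"⟩,
           ⟨"claude", some "https://api.anthropic.com/v1/", "ANTHROPIC_API_KEY"⟩]⟩,
    ⟨"q", [⟨"qwen", some "http://localhost:8000/v1", "VLLM_API_KEY"⟩]⟩,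
    ⟨"d", [⟨"deepseek-ai", some "http://localhost:8000/v1", "VLLM_API_KEY"⟩,
           ⟨"deepseek", some "https://api.deepseek.com", "DEEPSEEK_API_KEY"⟩]⟩,
    ⟨"m", [⟨"mistral", some "https://api.mistral.ai/v1", "MISTRAL_API_KEY"⟩]⟩]

-- Source B's 'for prefix, base_url, api_key_env in bucket: if m.startswith(prefix): return {…}'
def pvLoopB (m : String) : List (String × Option String × String) → List (String × Option String)
  | [] => []          -- the ValueError branch, excluded by Pre_
  | e :: rest =>
    if PySem.Str.startswith m e.1 then [⟨"base_url", e.2.1⟩, ⟨"api_key_env", some e.2.2⟩]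
    else pvLoopB m rest

def resolve_provider_py_alt (model : String) : List (String × Option String) :=
  let m := PySem.Str.lower model
  pvLoopB m (PySem.Dict.getD pvIndex (PySem.Str.slice m none (some 1)) [])

-- ===== PRECONDITION & SPEC =====
-- Pre_ excludes exactly the inputs on which A raises ValueError: models whose lowercase form starts with no supported prefix
def Pre_resolve_provider_py (model : String) : Prop :=
  (PySem.Dict.keys pvProviders).any (fun p => PySem.Str.startswith (PySem.Str.lower model) p) = true
instance (model : String) : Decidable (Pre_resolve_provider_py model) := by unfold Pre_resolve_provider_py; infer_instance
def pvWitness_resolve_provider_py : String := "GPT-4o"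

def Spec_resolve_provider_py (model : String) (out : List (String × Option String)) : Prop := out = resolve_provider_py_alt model
instance (model : String) (out : List (String × Option String)) : Decidable (Spec_resolve_provider_py model out) := by unfold Spec_resolve_provider_py; infer_instance

-- ===== CLAIM (what is proved, stated in full; the proofs are below) =====
def Claim_equal_resolve_provider_py : Prop := ∀ (model : String), Dom_resolve_provider_py model → Pre_resolve_provider_py model → Spec_resolve_provider_py model (resolve_provider_py model)

-- ===== LEMMAS AND PROOFS =====
-- the constant pieces of both ports, evaluated once
theorem pv_sorted : PySem.List.sorted (PySem.Dict.keys pvProviders) (fun p => PySem.Str.len p) true =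
    ["deepseek-ai", "codellama", "deepseek", "mistral", "gemini", "claude", "qwen", "gpt", "o1", "o3"] := by decide

theorem pv_keys : PySem.Dict.keys pvProviders =
    ["gpt", "o1", "o3", "gemini", "claude", "qwen", "codellama", "deepseek-ai", "deepseek", "mistral"] := by decide

-- two prefixes of the same string are comparable; incomparable literal prefixes cannot both match
theorem pv_excl {s p q : String} (hpq : decide (p.toList <+: q.toList) = false)
    (hqp : decide (q.toList <+: p.toList) = false)
    (hp : PySem.Str.startswith s p = true) : PySem.Str.startswith s q = false := by
  simp only [decide_eq_false_iff_not] at hpq hqp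
  rw [Bool.eq_false_iff]
  intro hq
  simp only [PySem.Str.startswith_eq, PySem.Chars.startswith_iff] at hp hq
  rcases List.prefix_or_prefix_of_prefix hp hq with h | h
  · exact hpq h
  · exact hqp h

-- a prefix of a matching prefix matches too
theorem pv_imp {s p q : String} (hqp : decide (q.toList <+: p.toList) = true)
    (hp : PySem.Str.startswith s p = true) : PySem.Str.startswith s q = true := by
  simp only [PySem.Str.startswith_eq, PySem.Chars.startswith_iff] at hp ⊢
  exact (of_decide_eq_true hqp).trans hp

-- if m starts with p then m[:1] is p's first character
theorem pv_first {m p d : String} (hd : p.toList.take 1 = d.toList) (hne : p.toList ≠ [])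
    (h : PySem.Str.startswith m p = true) : PySem.Str.slice m none (some 1) = d := by
  apply String.toList_inj.mp
  rw [PySem.Str.toList_slice]
  simp only [PySem.Str.startswith_eq, PySem.Chars.startswith_iff] at h
  obtain ⟨t, ht⟩ := h
  rw [PySem.Chars.slice_eq_listSlice, ← ht]
  have h1 : PySem.List.slice (p.toList ++ t) none (some 1) = (p.toList ++ t).take 1 := by
    simpa using PySem.List.slice_to_natCast (xs := p.toList ++ t) (b := 1)
  rw [h1, List.take_append_of_le_length (by
    have := List.length_pos_iff.mpr hne
    omega), hd]

-- the six buckets of pvIndex, evaluated once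
theorem pv_bucket_g : PySem.Dict.getD pvIndex "g" [] = [("gemini", some "https://generativelanguage.googleapis.com/v1beta/openai/", "GOOGLE_API_KEY"), ("gpt", none, "OPENAI_API_KEY")] := by decide
theorem pv_bucket_o : PySem.Dict.getD pvIndex "o" [] = [("o1", none, "OPENAI_API_KEY"), ("o3", none, "OPENAI_API_KEY")] := by decide
theorem pv_bucket_c : PySem.Dict.getD pvIndex "c" [] = [("codellama", some "http://localhost:8000/v1", "VLLM_API_KEY"), ("claude", some "https://api.anthropic.com/v1/", "ANTHROPIC_API_KEY")] := by decide
theorem pv_bucket_q : PySem.Dict.getD pvIndex "q" [] = [("qwen", some "http://localhost:8000/v1", "VLLM_API_KEY")] := by decide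
theorem pv_bucket_d : PySem.Dict.getD pvIndex "d" [] = [("deepseek-ai", some "http://localhost:8000/v1", "VLLM_API_KEY"), ("deepseek", some "https://api.deepseek.com", "DEEPSEEK_API_KEY")] := by decide
theorem pv_bucket_m : PySem.Dict.getD pvIndex "m" [] = [("mistral", some "https://api.mistral.ai/v1", "MISTRAL_API_KEY")] := by decide

-- ===== VERDICT (by name: the statement is the Claim_ definition above) =====
theorem resolve_provider_py_spec : Claim_equal_resolve_provider_py := by
  intro model _ hpre
  unfold Spec_resolve_provider_py
  cases hdai : PySem.Str.startswith (PySem.Str.lower model) "deepseek-ai" with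
  | true =>
    have hcod : PySem.Str.startswith (PySem.Str.lower model) "codellama" = false := pv_excl (by decide) (by decide) hdai
    have hdse : PySem.Str.startswith (PySem.Str.lower model) "deepseek" = true := pv_imp (by decide) hdai
    have hmis : PySem.Str.startswith (PySem.Str.lower model) "mistral" = false := pv_excl (by decide) (by decide) hdai
    have hgem : PySem.Str.startswith (PySem.Str.lower model) "gemini" = false := pv_excl (by decide) (by decide) hdai
    have hcla : PySem.Str.startswith (PySem.Str.lower model) "claude" = false := pv_excl (by decide) (by decide) hdai
    have hqwn : PySem.Str.startswith (PySem.Str.lower model) "qwen" = false := pv_excl (by decide) (by decide) hdai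
    have hgpt : PySem.Str.startswith (PySem.Str.lower model) "gpt" = false := pv_excl (by decide) (by decide) hdai
    have ho1 : PySem.Str.startswith (PySem.Str.lower model) "o1" = false := pv_excl (by decide) (by decide) hdai
    have ho3 : PySem.Str.startswith (PySem.Str.lower model) "o3" = false := pv_excl (by decide) (by decide) hdai
    have hk : PySem.Str.slice (PySem.Str.lower model) none (some 1) = "d" := pv_first (by decide) (by decide) hdai
    simp only [resolve_provider_py, resolve_provider_py_alt, pvLoopA, pvLoopB, pv_sorted, pv_bucket_d, hk, hdai, hcod, hdse, hmis, hgem, hcla, hqwn, hgpt, ho1, ho3]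
    decide
  | false =>
    cases hcod : PySem.Str.startswith (PySem.Str.lower model) "codellama" with
    | true =>
      have hdse : PySem.Str.startswith (PySem.Str.lower model) "deepseek" = false := pv_excl (by decide) (by decide) hcod
      have hmis : PySem.Str.startswith (PySem.Str.lower model) "mistral" = false := pv_excl (by decide) (by decide) hcod
      have hgem : PySem.Str.startswith (PySem.Str.lower model) "gemini" = false := pv_excl (by decide) (by decide) hcod
      have hcla : PySem.Str.startswith (PySem.Str.lower model) "claude" = false := pv_excl (by decide) (by decide) hcod
      have hqwn : PySem.Str.startswith (PySem.Str.lower model) "qwen" = false := pv_excl (by decide) (by decide) hcod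
      have hgpt : PySem.Str.startswith (PySem.Str.lower model) "gpt" = false := pv_excl (by decide) (by decide) hcod
      have ho1 : PySem.Str.startswith (PySem.Str.lower model) "o1" = false := pv_excl (by decide) (by decide) hcod
      have ho3 : PySem.Str.startswith (PySem.Str.lower model) "o3" = false := pv_excl (by decide) (by decide) hcod
      have hk : PySem.Str.slice (PySem.Str.lower model) none (some 1) = "c" := pv_first (by decide) (by decide) hcod
      simp only [resolve_provider_py, resolve_provider_py_alt, pvLoopA, pvLoopB, pv_sorted, pv_bucket_c, hk, hdai, hcod, hdse, hmis, hgem, hcla, hqwn, hgpt, ho1, ho3]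
      decide
    | false =>
      cases hdse : PySem.Str.startswith (PySem.Str.lower model) "deepseek" with
      | true =>
        have hmis : PySem.Str.startswith (PySem.Str.lower model) "mistral" = false := pv_excl (by decide) (by decide) hdse
        have hgem : PySem.Str.startswith (PySem.Str.lower model) "gemini" = false := pv_excl (by decide) (by decide) hdse
        have hcla : PySem.Str.startswith (PySem.Str.lower model) "claude" = false := pv_excl (by decide) (by decide) hdse
        have hqwn : PySem.Str.startswith (PySem.Str.lower model) "qwen" = false := pv_excl (by decide) (by decide) hdse
        have hgpt : PySem.Str.startswith (PySem.Str.lower model) "gpt" = false := pv_excl (by decide) (by decide) hdse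
        have ho1 : PySem.Str.startswith (PySem.Str.lower model) "o1" = false := pv_excl (by decide) (by decide) hdse
        have ho3 : PySem.Str.startswith (PySem.Str.lower model) "o3" = false := pv_excl (by decide) (by decide) hdse
        have hk : PySem.Str.slice (PySem.Str.lower model) none (some 1) = "d" := pv_first (by decide) (by decide) hdse
        simp only [resolve_provider_py, resolve_provider_py_alt, pvLoopA, pvLoopB, pv_sorted, pv_bucket_d, hk, hdai, hcod, hdse, hmis, hgem, hcla, hqwn, hgpt, ho1, ho3]
        decide
      | false =>
        cases hmis : PySem.Str.startswith (PySem.Str.lower model) "mistral" with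
        | true =>
          have hgem : PySem.Str.startswith (PySem.Str.lower model) "gemini" = false := pv_excl (by decide) (by decide) hmis
          have hcla : PySem.Str.startswith (PySem.Str.lower model) "claude" = false := pv_excl (by decide) (by decide) hmis
          have hqwn : PySem.Str.startswith (PySem.Str.lower model) "qwen" = false := pv_excl (by decide) (by decide) hmis
          have hgpt : PySem.Str.startswith (PySem.Str.lower model) "gpt" = false := pv_excl (by decide) (by decide) hmis
          have ho1 : PySem.Str.startswith (PySem.Str.lower model) "o1" = false := pv_excl (by decide) (by decide) hmis
          have ho3 : PySem.Str.startswith (PySem.Str.lower model) "o3" = false := pv_excl (by decide) (by decide) hmis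
          have hk : PySem.Str.slice (PySem.Str.lower model) none (some 1) = "m" := pv_first (by decide) (by decide) hmis
          simp only [resolve_provider_py, resolve_provider_py_alt, pvLoopA, pvLoopB, pv_sorted, pv_bucket_m, hk, hdai, hcod, hdse, hmis, hgem, hcla, hqwn, hgpt, ho1, ho3]
          decide
        | false =>
          cases hgem : PySem.Str.startswith (PySem.Str.lower model) "gemini" with
          | true =>
            have hcla : PySem.Str.startswith (PySem.Str.lower model) "claude" = false := pv_excl (by decide) (by decide) hgem
            have hqwn : PySem.Str.startswith (PySem.Str.lower model) "qwen" = false := pv_excl (by decide) (by decide) hgem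
            have hgpt : PySem.Str.startswith (PySem.Str.lower model) "gpt" = false := pv_excl (by decide) (by decide) hgem
            have ho1 : PySem.Str.startswith (PySem.Str.lower model) "o1" = false := pv_excl (by decide) (by decide) hgem
            have ho3 : PySem.Str.startswith (PySem.Str.lower model) "o3" = false := pv_excl (by decide) (by decide) hgem
            have hk : PySem.Str.slice (PySem.Str.lower model) none (some 1) = "g" := pv_first (by decide) (by decide) hgem
            simp only [resolve_provider_py, resolve_provider_py_alt, pvLoopA, pvLoopB, pv_sorted, pv_bucket_g, hk, hdai, hcod, hdse, hmis, hgem, hcla, hqwn, hgpt, ho1, ho3]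
            decide
          | false =>
            cases hcla : PySem.Str.startswith (PySem.Str.lower model) "claude" with
            | true =>
              have hqwn : PySem.Str.startswith (PySem.Str.lower model) "qwen" = false := pv_excl (by decide) (by decide) hcla
              have hgpt : PySem.Str.startswith (PySem.Str.lower model) "gpt" = false := pv_excl (by decide) (by decide) hcla
              have ho1 : PySem.Str.startswith (PySem.Str.lower model) "o1" = false := pv_excl (by decide) (by decide) hcla
              have ho3 : PySem.Str.startswith (PySem.Str.lower model) "o3" = false := pv_excl (by decide) (by decide) hcla
              have hk : PySem.Str.slice (PySem.Str.lower model) none (some 1) = "c" := pv_first (by decide) (by decide) hcla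
              simp only [resolve_provider_py, resolve_provider_py_alt, pvLoopA, pvLoopB, pv_sorted, pv_bucket_c, hk, hdai, hcod, hdse, hmis, hgem, hcla, hqwn, hgpt, ho1, ho3]
              decide
            | false =>
              cases hqwn : PySem.Str.startswith (PySem.Str.lower model) "qwen" with
              | true =>
                have hgpt : PySem.Str.startswith (PySem.Str.lower model) "gpt" = false := pv_excl (by decide) (by decide) hqwn
                have ho1 : PySem.Str.startswith (PySem.Str.lower model) "o1" = false := pv_excl (by decide) (by decide) hqwn
                have ho3 : PySem.Str.startswith (PySem.Str.lower model) "o3" = false := pv_excl (by decide) (by decide) hqwn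
                have hk : PySem.Str.slice (PySem.Str.lower model) none (some 1) = "q" := pv_first (by decide) (by decide) hqwn
                simp only [resolve_provider_py, resolve_provider_py_alt, pvLoopA, pvLoopB, pv_sorted, pv_bucket_q, hk, hdai, hcod, hdse, hmis, hgem, hcla, hqwn, hgpt, ho1, ho3]
                decide
              | false =>
                cases hgpt : PySem.Str.startswith (PySem.Str.lower model) "gpt" with
                | true =>
                  have ho1 : PySem.Str.startswith (PySem.Str.lower model) "o1" = false := pv_excl (by decide) (by decide) hgpt
                  have ho3 : PySem.Str.startswith (PySem.Str.lower model) "o3" = false := pv_excl (by decide) (by decide) hgpt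
                  have hk : PySem.Str.slice (PySem.Str.lower model) none (some 1) = "g" := pv_first (by decide) (by decide) hgpt
                  simp only [resolve_provider_py, resolve_provider_py_alt, pvLoopA, pvLoopB, pv_sorted, pv_bucket_g, hk, hdai, hcod, hdse, hmis, hgem, hcla, hqwn, hgpt, ho1, ho3]
                  decide
                | false =>
                  cases ho1 : PySem.Str.startswith (PySem.Str.lower model) "o1" with
                  | true =>
                    have ho3 : PySem.Str.startswith (PySem.Str.lower model) "o3" = false := pv_excl (by decide) (by decide) ho1
                    have hk : PySem.Str.slice (PySem.Str.lower model) none (some 1) = "o" := pv_first (by decide) (by decide) ho1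
                    simp only [resolve_provider_py, resolve_provider_py_alt, pvLoopA, pvLoopB, pv_sorted, pv_bucket_o, hk, hdai, hcod, hdse, hmis, hgem, hcla, hqwn, hgpt, ho1, ho3]
                    decide
                  | false =>
                    cases ho3 : PySem.Str.startswith (PySem.Str.lower model) "o3" with
                    | true =>
                      have hk : PySem.Str.slice (PySem.Str.lower model) none (some 1) = "o" := pv_first (by decide) (by decide) ho3
                      simp only [resolve_provider_py, resolve_provider_py_alt, pvLoopA, pvLoopB, pv_sorted, pv_bucket_o, hk, hdai, hcod, hdse, hmis, hgem, hcla, hqwn, hgpt, ho1, ho3]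
                      decide
                    | false =>
                      exfalso
                      simp only [Pre_resolve_provider_py, pv_keys, List.any_cons, List.any_nil, hdai, hcod, hdse, hmis, hgem, hcla, hqwn, hgpt, ho1, ho3, Bool.or_self] at hpre
                      exact Bool.false_ne_true hpre
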